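-- pv_equiv track=rewrite | github.com/Dmitry734/HomeWork9 | virtualenv_tic_tac_toe.py | WhereToInput
-- ===== SOURCE A (Python) =====
-- def WhereToInput(AdressList, List):
--     ReturnList = [0, 0]
--     # AdressList - это список с указанием номера строки/столбца/диагонали где наименьшее значение и обозначение, куда ставить следующи выбор:строка/столбец/диагональ
--     # строка =0 столбец=1 диагональ=2
--     # List - это общий список игры, где бот выставляет только -1, а игрок только +1
--     if AdressList[1] == 0:  # строка =0
--         for j in range(len(List[AdressList[0]])):
--             if List[AdressList[0]][j] != -1:
--                 # Поиск первой подходящей коорднаты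
--                 ReturnList[0] = AdressList[0]
--                 ReturnList[1] = j
--     elif AdressList[1] == 1:  # столбец=1
--         for i in range(len(List[AdressList[0]])):
--             if List[i][AdressList[0]] != -1:
--                 # Поиск первой подходящей коорднаты
--                 ReturnList[0] = i
--                 ReturnList[1] = AdressList[0]
--     elif AdressList[1] == 2:  # диагональ=2
--         if AdressList[0] == 0:  # Первая диагональ
--             for i in range(0, 3):
--                 if List[i][i] != -1:
--                     # Поиск первой подходящей коорднаты
--                     ReturnList[0] = i
--                     ReturnList[1] = i
--         elif AdressList[0] == 1:  # Вторая диагональ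
--             for j in range(2, -1, -1):
--                 i = abs(j-2)
--                 if List[i][j] != -1:
--                     # Поиск первой подходящей коорднаты
--                     ReturnList[0] = i
--                     ReturnList[1] = j
--
--     return ReturnList
-- ===== SOURCE B (Python) =====
-- def WhereToInput(AdressList, List):
--     # Reverse early-exit search: the first non -1 cell scanning the line BACKWARDS
--     # is A's last-overwrite forward result. Cells are given by an arithmetic map.
--     n, kind = AdressList[0], AdressList[1]
--     if kind == 0:
--         L, cell = len(List[n]), (lambda k: (n, k))
--     elif kind == 1:
--         L, cell = len(List[n]), (lambda k: (k, n))
--     elif kind == 2 and n == 0: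
--         L, cell = 3, (lambda k: (k, k))
--     elif kind == 2 and n == 1:
--         L, cell = 3, (lambda k: (k, 2 - k))
--     else:
--         return [0, 0]
--     for k in range(L - 1, -1, -1):
--         i, j = cell(k)
--         if List[i][j] != -1:
--             return [i, j]
--     return [0, 0]
-- ===== Notes on version B (the rewrite author's own statement) =====
-- stated objective: alternative
-- what changed: B replaces A's four forward last-overwrite scans by a single backward early-exit search over an arithmetic cell map (k -> coordinates), returning at the first non -1 cell found in reverse order.
import Mathlib
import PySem

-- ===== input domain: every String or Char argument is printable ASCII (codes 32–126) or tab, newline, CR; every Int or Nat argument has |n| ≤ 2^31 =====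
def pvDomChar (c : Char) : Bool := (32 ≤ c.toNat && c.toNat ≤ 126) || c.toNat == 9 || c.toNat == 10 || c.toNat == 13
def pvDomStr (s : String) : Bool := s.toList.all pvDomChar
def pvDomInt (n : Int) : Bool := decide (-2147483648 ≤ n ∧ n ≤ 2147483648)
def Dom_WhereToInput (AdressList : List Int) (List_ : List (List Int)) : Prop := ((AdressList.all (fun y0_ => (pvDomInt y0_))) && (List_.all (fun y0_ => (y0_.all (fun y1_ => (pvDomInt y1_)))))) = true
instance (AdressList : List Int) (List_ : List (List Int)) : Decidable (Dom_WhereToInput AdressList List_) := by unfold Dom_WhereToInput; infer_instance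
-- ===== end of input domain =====

-- B replaces A's four forward last-overwrite scans by one backward early-exit search over
-- an arithmetic cell map (objective: alternative; same asymptotic cost).

-- ===== PORT A =====
-- Literal transliteration of A: four branch-specific loops, each overwriting ReturnList
-- on every non-(-1) cell (last match wins). Out-of-range indexing (Python IndexError)
-- is excluded by Pre_; pyGetD's default is never reached under Pre_.
def WhereToInput (AdressList : List Int) (List_ : List (List Int)) : List Int :=
  if PySem.List.pyGetD AdressList 1 0 = 0 then
    (List.range (PySem.List.pyGetD List_ (PySem.List.pyGetD AdressList 0 0) []).length).foldl
      (fun r (j : Nat) => if PySem.List.pyGetD (PySem.List.pyGetD List_ (PySem.List.pyGetD AdressList 0 0) []) (j : Int) 0 ≠ -1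
                  then [PySem.List.pyGetD AdressList 0 0, (j : Int)] else r) [0, 0]
  else if PySem.List.pyGetD AdressList 1 0 = 1 then
    (List.range (PySem.List.pyGetD List_ (PySem.List.pyGetD AdressList 0 0) []).length).foldl
      (fun r (i : Nat) => if PySem.List.pyGetD (PySem.List.pyGetD List_ (i : Int) []) (PySem.List.pyGetD AdressList 0 0) 0 ≠ -1
                  then [(i : Int), PySem.List.pyGetD AdressList 0 0] else r) [0, 0]
  else if PySem.List.pyGetD AdressList 1 0 = 2 then
    if PySem.List.pyGetD AdressList 0 0 = 0 then
      (List.range 3).foldl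
        (fun r (i : Nat) => if PySem.List.pyGetD (PySem.List.pyGetD List_ (i : Int) []) (i : Int) 0 ≠ -1
                    then [(i : Int), (i : Int)] else r) [0, 0]
    else if PySem.List.pyGetD AdressList 0 0 = 1 then
      (PySem.List.pyRange 2 (-1) (-1)).foldl
        (fun r j => if PySem.List.pyGetD (PySem.List.pyGetD List_ |j - 2| []) j 0 ≠ -1
                    then [|j - 2|, j] else r) [0, 0]
    else [0, 0]
  else [0, 0]

-- ===== PORT B =====
-- Source B's backward loop `for k in range(L-1, -1, -1): … return [i, j]` as structural
-- recursion on k: pvFindRev checks cell (k) at argument k+1 and recurses downwards,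
-- returning at the first non -1 cell (early exit).
def pvFindRev (List_ : List (List Int)) (cell : Nat → Int × Int) : Nat → List Int
  | 0 => [0, 0]
  | Nat.succ k =>
      let p := cell k
      if PySem.List.pyGetD (PySem.List.pyGetD List_ p.1 []) p.2 0 ≠ -1 then [p.1, p.2]
      else pvFindRev List_ cell k

def WhereToInput_alt (AdressList : List Int) (List_ : List (List Int)) : List Int :=
  if PySem.List.pyGetD AdressList 1 0 = 0 then
    pvFindRev List_ (fun k => (PySem.List.pyGetD AdressList 0 0, (k : Int)))
      (PySem.List.pyGetD List_ (PySem.List.pyGetD AdressList 0 0) []).length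
  else if PySem.List.pyGetD AdressList 1 0 = 1 then
    pvFindRev List_ (fun k => ((k : Int), PySem.List.pyGetD AdressList 0 0))
      (PySem.List.pyGetD List_ (PySem.List.pyGetD AdressList 0 0) []).length
  else if PySem.List.pyGetD AdressList 1 0 = 2 ∧ PySem.List.pyGetD AdressList 0 0 = 0 then
    pvFindRev List_ (fun k => ((k : Int), (k : Int))) 3
  else if PySem.List.pyGetD AdressList 1 0 = 2 ∧ PySem.List.pyGetD AdressList 0 0 = 1 then
    pvFindRev List_ (fun k => ((k : Int), 2 - (k : Int))) 3
  else [0, 0]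

-- ===== PRECONDITION & SPEC =====
def pvOkIdx (a : Int) (n : Nat) : Prop := -(n : Int) ≤ a ∧ a < (n : Int)

-- Pre_ = exactly the inputs on which the Python A returns (no IndexError): every list
-- index A performs is in Python's (possibly negative) valid range.
def Pre_WhereToInput (AdressList : List Int) (List_ : List (List Int)) : Prop :=
  2 ≤ AdressList.length ∧
  (PySem.List.pyGetD AdressList 1 0 = 0 → pvOkIdx (PySem.List.pyGetD AdressList 0 0) List_.length) ∧
  (PySem.List.pyGetD AdressList 1 0 = 1 →
    pvOkIdx (PySem.List.pyGetD AdressList 0 0) List_.length ∧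
    ∀ i ∈ List.range (PySem.List.pyGetD List_ (PySem.List.pyGetD AdressList 0 0) []).length,
      i < List_.length ∧
      pvOkIdx (PySem.List.pyGetD AdressList 0 0) (PySem.List.pyGetD List_ (i : Int) []).length) ∧
  (PySem.List.pyGetD AdressList 1 0 = 2 → PySem.List.pyGetD AdressList 0 0 = 0 →
    3 ≤ List_.length ∧ ∀ i ∈ List.range 3, i < (PySem.List.pyGetD List_ (i : Int) []).length) ∧
  (PySem.List.pyGetD AdressList 1 0 = 2 → PySem.List.pyGetD AdressList 0 0 = 1 →
    3 ≤ List_.length ∧ 3 ≤ (PySem.List.pyGetD List_ 0 []).length ∧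
    2 ≤ (PySem.List.pyGetD List_ 1 []).length ∧ 1 ≤ (PySem.List.pyGetD List_ 2 []).length)

instance (AdressList : List Int) (List_ : List (List Int)) : Decidable (Pre_WhereToInput AdressList List_) := by
  unfold Pre_WhereToInput pvOkIdx; infer_instance

def pvWitness_WhereToInput : List Int × List (List Int) :=
  ([0, 0], [[1, -1, 0], [0, 1, -1], [-1, 0, 1]])

def Spec_WhereToInput (AdressList : List Int) (List_ : List (List Int)) (out : List Int) : Prop := out = WhereToInput_alt AdressList List_
instance (AdressList : List Int) (List_ : List (List Int)) (out : List Int) : Decidable (Spec_WhereToInput AdressList List_ out) := by unfold Spec_WhereToInput; infer_instance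

-- ===== CLAIM (what is proved, stated in full; the proofs are below) =====
def Claim_equal_WhereToInput : Prop := ∀ (AdressList : List Int) (List_ : List (List Int)), Dom_WhereToInput AdressList List_ → Pre_WhereToInput AdressList List_ → Spec_WhereToInput AdressList List_ (WhereToInput AdressList List_)

-- ===== LEMMAS AND PROOFS =====

-- forward last-overwrite fold over range L = backward first-match early-exit search
theorem foldl_eq_findRev (List_ : List (List Int)) (f : Nat → Int × Int) (L : Nat) :
    (List.range L).foldl
      (fun r k => if PySem.List.pyGetD (PySem.List.pyGetD List_ (f k).1 []) (f k).2 0 ≠ -1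
                  then [(f k).1, (f k).2] else r) [0, 0] = pvFindRev List_ f L := by
  induction L with
  | zero => rfl
  | succ L ih => rw [List.range_succ, List.foldl_append, ih]; rfl

-- ===== VERDICT (by name: the statement is the Claim_ definition above) =====
theorem WhereToInput_spec : Claim_equal_WhereToInput := by
  intro AdressList List_ _ _
  unfold Spec_WhereToInput WhereToInput WhereToInput_alt
  by_cases h0 : PySem.List.pyGetD AdressList 1 0 = 0
  · rw [if_pos h0, if_pos h0]
    exact foldl_eq_findRev List_ (fun k => (PySem.List.pyGetD AdressList 0 0, (k : Int))) _
  · rw [if_neg h0, if_neg h0]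
    by_cases h1 : PySem.List.pyGetD AdressList 1 0 = 1
    · rw [if_pos h1, if_pos h1]
      exact foldl_eq_findRev List_ (fun k => ((k : Int), PySem.List.pyGetD AdressList 0 0)) _
    · rw [if_neg h1, if_neg h1]
      by_cases h2 : PySem.List.pyGetD AdressList 1 0 = 2
      · rw [if_pos h2]
        by_cases g0 : PySem.List.pyGetD AdressList 0 0 = 0
        · rw [if_pos g0, if_pos ⟨h2, g0⟩]
          exact foldl_eq_findRev List_ (fun k => ((k : Int), (k : Int))) 3
        · have nb0 : ¬ (PySem.List.pyGetD AdressList 1 0 = 2 ∧ PySem.List.pyGetD AdressList 0 0 = 0) :=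
            fun h => g0 h.2
          rw [if_neg g0, if_neg nb0]
          by_cases g1 : PySem.List.pyGetD AdressList 0 0 = 1
          · -- second diagonal: both sides are three nested ifs on the same cells
            rw [if_pos g1, if_pos ⟨h2, g1⟩,
              show PySem.List.pyRange 2 (-1) (-1) = [2, 1, 0] from by decide]
            simp only [List.foldl_cons, List.foldl_nil, pvFindRev]
            norm_num
          · have nb1 : ¬ (PySem.List.pyGetD AdressList 1 0 = 2 ∧ PySem.List.pyGetD AdressList 0 0 = 1) :=
              fun h => g1 h.2
            rw [if_neg g1, if_neg nb1]
      · have nb0 : ¬ (PySem.List.pyGetD AdressList 1 0 = 2 ∧ PySem.List.pyGetD AdressList 0 0 = 0) :=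
          fun h => h2 h.1
        have nb1 : ¬ (PySem.List.pyGetD AdressList 1 0 = 2 ∧ PySem.List.pyGetD AdressList 0 0 = 1) :=
          fun h => h2 h.1
        rw [if_neg h2, if_neg nb0, if_neg nb1]
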